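-- pv_equiv track=rewrite | github.com/debdattasarkar/DSA | 2. GFG/0. All/9. Stack/(M) Maximum People Visible in a Line/py_sol.py | maxPeople
-- ===== SOURCE A (Python) =====
-- def maxPeople(arr):
--     n = len(arr)
--     if n == 0:
--         return 0
--
--     prev_ge = [-1] * n   # previous index with arr[idx] >= arr[i]
--     next_ge = [n] * n    # next index with arr[idx] >= arr[i]
--
--     # -------- prev greater-or-equal (>=) using decreasing stack --------
--     # Stack stores indices with heights in NON-increasing order.
--     stack = []
--     for i in range(n):
--         # pop strictly smaller, because they can't block current or future >= queries
--         while stack and arr[stack[-1]] < arr[i]: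
--             stack.pop()
--         prev_ge[i] = stack[-1] if stack else -1
--         stack.append(i)
--
--     # -------- next greater-or-equal (>=) from right --------
--     stack = []
--     for i in range(n - 1, -1, -1):
--         while stack and arr[stack[-1]] < arr[i]:
--             stack.pop()
--         next_ge[i] = stack[-1] if stack else n
--         stack.append(i)
--
--     # visible[i] = next_ge[i] - prev_ge[i] - 1
--     best = 1
--     for i in range(n):
--         visible = next_ge[i] - prev_ge[i] - 1
--         if visible > best:
--             best = visible
--
--     return best
-- ===== SOURCE B (Python) =====
-- def maxPeople(arr):
--     n = len(arr)
--     if n == 0: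
--         return 0
--     best = 1
--     for i in range(n):
--         x = arr[i]
--         j = i - 1
--         while j >= 0 and arr[j] < x:
--             j -= 1
--         k = i + 1
--         while k < n and arr[k] < x:
--             k += 1
--         visible = k - j - 1
--         if visible > best:
--             best = visible
--     return best
-- ===== Notes on version B (the rewrite author's own statement) =====
-- stated objective: simpler
-- what changed: Replaced the two monotonic-stack passes and the intermediate prev_ge/next_ge arrays with a single loop that, for each index, scans directly left and right to the first >= height; same running maximum.
import Mathlib
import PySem

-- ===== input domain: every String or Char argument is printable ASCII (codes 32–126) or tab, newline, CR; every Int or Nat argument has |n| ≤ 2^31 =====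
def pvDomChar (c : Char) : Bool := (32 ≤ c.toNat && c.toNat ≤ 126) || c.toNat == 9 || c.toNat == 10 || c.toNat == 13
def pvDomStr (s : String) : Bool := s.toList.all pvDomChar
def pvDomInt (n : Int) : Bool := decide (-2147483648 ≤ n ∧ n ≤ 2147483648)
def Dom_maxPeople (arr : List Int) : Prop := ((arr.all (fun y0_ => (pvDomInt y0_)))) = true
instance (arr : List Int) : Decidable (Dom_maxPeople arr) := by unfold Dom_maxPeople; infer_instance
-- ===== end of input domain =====

-- B replaces A's two monotonic-stack passes by a direct left/right scan per index: simpler, no stacks or arrays (return value only; no mutation in either).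

-- ===== PORT A =====
-- body of A's first for-loop (the while-pop is the dropWhile on the head-is-top stack)
def stepA1 (arr : List Int) (sp : List Nat × List Int) (i : Nat) : List Nat × List Int :=
  let st := sp.1.dropWhile (fun j => arr.getD j 0 < arr.getD i 0)
  let p : Int := match st with | [] => -1 | j :: _ => (j : Int)
  (i :: st, sp.2.set i p)

-- body of A's second for-loop
def stepA2 (arr : List Int) (sp : List Nat × List Int) (i : Nat) : List Nat × List Int :=
  let st := sp.1.dropWhile (fun j => arr.getD j 0 < arr.getD i 0)
  let p : Int := match st with | [] => (arr.length : Int) | j :: _ => (j : Int)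
  (i :: st, sp.2.set i p)

def maxPeople (arr : List Int) : Int :=
  let n := arr.length
  if n = 0 then 0
  else
    let s1 := (List.range n).foldl (stepA1 arr) ([], List.replicate n (-1))
    let s2 := (List.range n).reverse.foldl (stepA2 arr) ([], List.replicate n (n : Int))
    (List.range n).foldl (fun best i =>
      let visible := s2.2.getD i 0 - s1.2.getD i 0 - 1
      if visible > best then visible else best) 1

-- ===== PORT B =====
-- leftward scan: j = m-1, m-2, … while arr[j] < x; returns first index with arr[j] ≥ x, else -1
def scanL (arr : List Int) (x : Int) : Nat → Int
  | 0 => -1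
  | j+1 => if x ≤ arr.getD j 0 then (j : Int) else scanL arr x j

-- rightward scan: k, k+1, … while arr[k] < x; returns first index with arr[k] ≥ x, else len(arr)
def scanR (arr : List Int) (x : Int) (k : Nat) : Int :=
  if k < arr.length then
    if x ≤ arr.getD k 0 then (k : Int) else scanR arr x (k+1)
  else (arr.length : Int)
termination_by arr.length - k

def maxPeople_alt (arr : List Int) : Int :=
  if arr.length = 0 then 0
  else
    (List.range arr.length).foldl (fun best i =>
      let x := arr.getD i 0
      let visible := scanR arr x (i+1) - scanL arr x i - 1
      if visible > best then visible else best) 1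

-- ===== PRECONDITION & SPEC =====
def Spec_maxPeople (arr : List Int) (out : Int) : Prop := out = maxPeople_alt arr
instance (arr : List Int) (out : Int) : Decidable (Spec_maxPeople arr out) := by unfold Spec_maxPeople; infer_instance

-- ===== CLAIM (what is proved, stated in full; the proofs are below) =====
def Claim_equal_maxPeople : Prop := ∀ (arr : List Int), Dom_maxPeople arr → Spec_maxPeople arr (maxPeople arr)

-- ===== LEMMAS AND PROOFS =====

-- the prev-GE chain: the exact content of A's first stack after processing index i
def chainL (arr : List Int) (i : Nat) : List Nat :=
  i :: (let p := scanL arr (arr.getD i 0) i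
        if h : 0 ≤ p ∧ p.toNat < i then chainL arr p.toNat else [])
termination_by i
decreasing_by exact h.2

def chainLOpt (arr : List Int) (p : Int) : List Nat :=
  if 0 ≤ p then chainL arr p.toNat else []

def cstackL (arr : List Int) : Nat → List Nat
  | 0 => []
  | m+1 => chainL arr m

-- the next-GE chain (second stack, built right-to-left)
def chainR (arr : List Int) (i : Nat) : List Nat :=
  i :: (let q := scanR arr (arr.getD i 0) (i+1)
        if h : i < q.toNat ∧ q.toNat < arr.length then chainR arr q.toNat else [])
termination_by arr.length - i
decreasing_by omega

def chainROpt (arr : List Int) (q : Int) : List Nat :=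
  if q.toNat < arr.length then chainR arr q.toNat else []

def cstackR (arr : List Int) (m : Nat) : List Nat :=
  if m < arr.length then chainR arr m else []

lemma scanL_spec (arr : List Int) (x : Int) (m : Nat) :
    (scanL arr x m = -1 ∧ ∀ k, k < m → arr.getD k 0 < x) ∨
    (∃ j : Nat, j < m ∧ scanL arr x m = (j : Int) ∧ x ≤ arr.getD j 0 ∧
      ∀ k, j < k → k < m → arr.getD k 0 < x) := by
  induction m with
  | zero => exact Or.inl ⟨rfl, fun k hk => absurd hk (by omega)⟩
  | succ m ih =>
    by_cases h : x ≤ arr.getD m 0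
    · exact Or.inr ⟨m, by omega, by simp only [scanL]; rw [if_pos h], h, fun k hk1 hk2 => by omega⟩
    · have hlt : arr.getD m 0 < x := lt_of_not_ge h
      have hstep : scanL arr x (m+1) = scanL arr x m := by simp only [scanL]; rw [if_neg h]
      rcases ih with ⟨h1, h2⟩ | ⟨j, hj1, hj2, hj3, hj4⟩
      · refine Or.inl ⟨hstep.trans h1, fun k hk => ?_⟩
        rcases Nat.lt_or_ge k m with hk' | hk'
        · exact h2 k hk'
        · have : k = m := by omega
          simpa [this] using hlt
      · refine Or.inr ⟨j, by omega, hstep.trans hj2, hj3, fun k hk1 hk2 => ?_⟩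
        rcases Nat.lt_or_ge k m with hk' | hk'
        · exact hj4 k hk1 hk'
        · have : k = m := by omega
          simpa [this] using hlt

lemma scanL_congr (arr : List Int) (x : Int) :
    ∀ (m m' : Nat), m' ≤ m → (∀ k, m' ≤ k → k < m → arr.getD k 0 < x) →
      scanL arr x m = scanL arr x m' := by
  intro m
  induction m with
  | zero => intro m' h _; interval_cases m'; rfl
  | succ m ih =>
    intro m' hle hall
    rcases Nat.lt_or_ge m' (m+1) with hlt | hge
    · have hm : arr.getD m 0 < x := hall m (by omega) (by omega)
      have : scanL arr x (m+1) = scanL arr x m := by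
        simp only [scanL]; rw [if_neg (not_le.mpr hm)]
      exact this.trans (ih m' (by omega) (fun k hk1 hk2 => hall k hk1 (by omega)))
    · have : m' = m+1 := by omega
      simp [this]

lemma chainL_eq (arr : List Int) (i : Nat) :
    chainL arr i = i :: chainLOpt arr (scanL arr (arr.getD i 0) i) := by
  rw [chainL, chainLOpt]
  rcases scanL_spec arr (arr.getD i 0) i with ⟨h1, _⟩ | ⟨j, hj1, hj2, _, _⟩
  · rw [h1]; norm_num
  · rw [hj2]
    have h0 : (0:Int) ≤ (j:Int) := Int.natCast_nonneg j
    have ht : ((j:Int)).toNat = j := Int.toNat_natCast j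
    simp [h0, ht, hj1]

lemma drop_chainL (arr : List Int) (x : Int) :
    ∀ i, (chainL arr i).dropWhile (fun k => arr.getD k 0 < x) =
      chainLOpt arr (scanL arr x (i+1)) := by
  intro i
  induction i using Nat.strong_induction_on with
  | _ i ih =>
    rw [chainL_eq]
    by_cases hgi : arr.getD i 0 < x
    · rw [List.dropWhile_cons_of_pos (by simpa using hgi)]
      have hstep : scanL arr x (i+1) = scanL arr x i := by
        simp only [scanL]; rw [if_neg (not_le.mpr hgi)]
      rw [hstep]
      rcases scanL_spec arr (arr.getD i 0) i with ⟨h1, h2⟩ | ⟨j, hj1, hj2, _, hj4⟩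
      · rw [h1]
        have hL : scanL arr x i = scanL arr x 0 :=
          scanL_congr arr x i 0 (by omega) (fun k _ hk2 => lt_trans (h2 k hk2) hgi)
        rw [hL]
        simp [chainLOpt, scanL]
      · rw [hj2]
        have hL : scanL arr x i = scanL arr x (j+1) :=
          scanL_congr arr x i (j+1) (by omega)
            (fun k hk1 hk2 => lt_trans (hj4 k (by omega) hk2) hgi)
        rw [hL, chainLOpt]
        rw [if_pos (Int.natCast_nonneg j), Int.toNat_natCast]
        exact ih j hj1
    · rw [List.dropWhile_cons_of_neg (by simpa using hgi)]
      have hstep : scanL arr x (i+1) = (i : Int) := by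
        simp only [scanL]; rw [if_pos (not_lt.mp hgi)]
      have h2 : chainLOpt arr ((i : Nat) : Int) = chainL arr i := by
        rw [chainLOpt, if_pos (Int.natCast_nonneg i), Int.toNat_natCast]
      rw [hstep, h2, chainL_eq]

lemma drop_cstackL (arr : List Int) (x : Int) (m : Nat) :
    (cstackL arr m).dropWhile (fun k => arr.getD k 0 < x) =
      chainLOpt arr (scanL arr x m) := by
  cases m with
  | zero => simp [cstackL, chainLOpt, scanL]
  | succ m => exact drop_chainL arr x m

lemma scanR_ge (arr : List Int) (x : Int) (k : Nat) (h : arr.length ≤ k) :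
    scanR arr x k = (arr.length : Int) := by
  rw [scanR, if_neg (by omega)]

lemma scanR_spec (arr : List Int) (x : Int) (k : Nat) :
    (scanR arr x k = (arr.length : Int) ∧ ∀ j, k ≤ j → j < arr.length → arr.getD j 0 < x) ∨
    (∃ j : Nat, k ≤ j ∧ j < arr.length ∧ scanR arr x k = (j : Int) ∧ x ≤ arr.getD j 0 ∧
      ∀ t, k ≤ t → t < j → arr.getD t 0 < x) := by
  have aux : ∀ d k, arr.length ≤ k + d →
      ((scanR arr x k = (arr.length : Int) ∧ ∀ j, k ≤ j → j < arr.length → arr.getD j 0 < x) ∨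
      (∃ j : Nat, k ≤ j ∧ j < arr.length ∧ scanR arr x k = (j : Int) ∧ x ≤ arr.getD j 0 ∧
        ∀ t, k ≤ t → t < j → arr.getD t 0 < x)) := by
    intro d
    induction d with
    | zero =>
      intro k hk
      exact Or.inl ⟨scanR_ge arr x k (by omega), fun j hj1 hj2 => absurd hj2 (by omega)⟩
    | succ d ih =>
      intro k hk
      by_cases hkn : k < arr.length
      · by_cases hx : x ≤ arr.getD k 0
        · exact Or.inr ⟨k, le_refl k, hkn, by rw [scanR, if_pos hkn, if_pos hx], hx,
            fun t ht1 ht2 => by omega⟩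
        · have hlt : arr.getD k 0 < x := lt_of_not_ge hx
          have hstep : scanR arr x k = scanR arr x (k+1) := by
            rw [scanR, if_pos hkn, if_neg hx]
          rcases ih (k+1) (by omega) with ⟨h1, h2⟩ | ⟨j, hj1, hj2, hj3, hj4, hj5⟩
          · refine Or.inl ⟨hstep.trans h1, fun j hj1 hj2 => ?_⟩
            rcases Nat.lt_or_ge k j with hj' | hj'
            · exact h2 j (by omega) hj2
            · have : j = k := by omega
              simpa [this] using hlt
          · refine Or.inr ⟨j, by omega, hj2, hstep.trans hj3, hj4, fun t ht1 ht2 => ?_⟩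
            rcases Nat.lt_or_ge k t with ht' | ht'
            · exact hj5 t (by omega) ht2
            · have : t = k := by omega
              simpa [this] using hlt
      · exact Or.inl ⟨scanR_ge arr x k (by omega), fun j hj1 hj2 => absurd hj2 (by omega)⟩
  exact aux arr.length k (by omega)

lemma scanR_congr (arr : List Int) (x : Int) :
    ∀ (k k' : Nat), k ≤ k' → (∀ t, k ≤ t → t < k' → arr.getD t 0 < x) →
      scanR arr x k = scanR arr x k' := by
  have aux : ∀ d k k', k' ≤ k + d → k ≤ k' → (∀ t, k ≤ t → t < k' → arr.getD t 0 < x) →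
      scanR arr x k = scanR arr x k' := by
    intro d
    induction d with
    | zero =>
      intro k k' h1 h2 _
      have : k = k' := by omega
      rw [this]
    | succ d ih =>
      intro k k' h1 h2 hall
      rcases Nat.lt_or_ge k k' with hlt | hge
      · by_cases hkn : k < arr.length
        · have hstep : scanR arr x k = scanR arr x (k+1) := by
            rw [scanR, if_pos hkn, if_neg (not_le.mpr (hall k (le_refl k) hlt))]
          exact hstep.trans (ih (k+1) k' (by omega) (by omega)
            (fun t ht1 ht2 => hall t (by omega) ht2))
        · rw [scanR_ge arr x k (by omega), scanR_ge arr x k' (by omega)]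
      · have : k = k' := by omega
        rw [this]
  exact fun k k' h2 hall => aux (k' - k) k k' (by omega) h2 hall

lemma chainR_eq (arr : List Int) (i : Nat) :
    chainR arr i = i :: chainROpt arr (scanR arr (arr.getD i 0) (i+1)) := by
  rw [chainR, chainROpt]
  rcases scanR_spec arr (arr.getD i 0) (i+1) with ⟨h1, _⟩ | ⟨j, hj1, hj2, hj3, _, _⟩
  · rw [h1]
    rw [dif_neg (by rw [Int.toNat_natCast]; omega), if_neg (by rw [Int.toNat_natCast]; omega)]
  · rw [hj3]
    rw [dif_pos (by rw [Int.toNat_natCast]; omega), if_pos (by rw [Int.toNat_natCast]; omega)]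

lemma drop_chainR (arr : List Int) (x : Int) :
    ∀ i, i < arr.length → (chainR arr i).dropWhile (fun k => arr.getD k 0 < x) =
      chainROpt arr (scanR arr x i) := by
  have aux : ∀ d i, i < arr.length → arr.length ≤ i + d →
      (chainR arr i).dropWhile (fun k => arr.getD k 0 < x) = chainROpt arr (scanR arr x i) := by
    intro d
    induction d with
    | zero => intro i h1 h2; omega
    | succ d ih =>
      intro i hin hfuel
      rw [chainR_eq]
      by_cases hgi : arr.getD i 0 < x
      · rw [List.dropWhile_cons_of_pos (by simpa using hgi)]
        have hstep : scanR arr x i = scanR arr x (i+1) := by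
          rw [scanR, if_pos hin, if_neg (not_le.mpr hgi)]
        rw [hstep]
        rcases scanR_spec arr (arr.getD i 0) (i+1) with ⟨h1, h2⟩ | ⟨j, hj1, hj2, hj3, _, hj5⟩
        · rw [h1]
          have hR : scanR arr x (i+1) = scanR arr x arr.length :=
            scanR_congr arr x (i+1) arr.length (by omega)
              (fun t ht1 ht2 => lt_trans (h2 t ht1 ht2) hgi)
          have hnil : chainROpt arr ((arr.length : Nat) : Int) = [] := by
            rw [chainROpt, if_neg (by rw [Int.toNat_natCast]; omega)]
          rw [hR, scanR_ge arr x arr.length (le_refl _), hnil]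
          rfl
        · rw [hj3]
          have hcj : chainROpt arr ((j : Nat) : Int) = chainR arr j := by
            rw [chainROpt, if_pos (by rw [Int.toNat_natCast]; omega), Int.toNat_natCast]
          have hR : scanR arr x (i+1) = scanR arr x j :=
            scanR_congr arr x (i+1) j hj1
              (fun t ht1 ht2 => lt_trans (hj5 t ht1 ht2) hgi)
          rw [hcj, hR]
          exact ih j hj2 (by omega)
      · rw [List.dropWhile_cons_of_neg (by simpa using hgi)]
        have hstep : scanR arr x i = (i : Int) := by
          rw [scanR, if_pos hin, if_pos (not_lt.mp hgi)]
        have hci : chainROpt arr ((i : Nat) : Int) = chainR arr i := by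
          rw [chainROpt, if_pos (by rw [Int.toNat_natCast]; omega), Int.toNat_natCast]
        rw [hstep, hci, chainR_eq]
  exact fun i hi => aux arr.length i hi (by omega)

lemma drop_cstackR (arr : List Int) (x : Int) (m : Nat) (hm : m ≤ arr.length) :
    (cstackR arr m).dropWhile (fun k => arr.getD k 0 < x) =
      chainROpt arr (scanR arr x m) := by
  rcases Nat.lt_or_ge m arr.length with h | h
  · rw [cstackR, if_pos h]
    exact drop_chainR arr x m h
  · have hm' : m = arr.length := by omega
    subst hm'
    rw [cstackR, if_neg (by omega), scanR_ge arr x _ (le_refl _)]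
    rw [chainROpt, if_neg (by rw [Int.toNat_natCast]; omega)]
    rfl

lemma loop1_inv (arr : List Int) :
    ∀ m, m ≤ arr.length →
      ((List.range m).foldl (stepA1 arr) ([], List.replicate arr.length (-1))).1
        = cstackL arr m ∧
      ((List.range m).foldl (stepA1 arr) ([], List.replicate arr.length (-1))).2.length
        = arr.length ∧
      ∀ k, k < arr.length →
        ((List.range m).foldl (stepA1 arr) ([], List.replicate arr.length (-1))).2.getD k 0
          = if k < m then scanL arr (arr.getD k 0) k else -1 := by
  intro m
  induction m with
  | zero =>
    intro _
    refine ⟨rfl, by simp, fun k hk => ?_⟩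
    rw [if_neg (by omega), List.getD_eq_getElem _ _ (by simpa using hk)]
    simp
  | succ m ih =>
    intro hm1
    obtain ⟨ih1, ih2, ih3⟩ := ih (by omega)
    rw [List.range_succ, List.foldl_append]
    simp only [List.foldl_cons, List.foldl_nil]
    set S := (List.range m).foldl (stepA1 arr) ([], List.replicate arr.length (-1)) with hS
    have hst : S.1.dropWhile (fun j => arr.getD j 0 < arr.getD m 0)
        = chainLOpt arr (scanL arr (arr.getD m 0) m) := by
      rw [ih1]; exact drop_cstackL arr (arr.getD m 0) m
    have hp : (match S.1.dropWhile (fun j => arr.getD j 0 < arr.getD m 0) with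
        | [] => (-1 : Int) | j :: _ => (j : Int)) = scanL arr (arr.getD m 0) m := by
      rw [hst]
      rcases scanL_spec arr (arr.getD m 0) m with ⟨h1, _⟩ | ⟨j, hj1, hj2, _, _⟩
      · rw [h1]; simp [chainLOpt]
      · rw [hj2]
        have hcj : chainLOpt arr ((j : Nat) : Int) = chainL arr j := by
          rw [chainLOpt, if_pos (Int.natCast_nonneg j), Int.toNat_natCast]
        rw [hcj, chainL_eq]
    refine ⟨?_, ?_, ?_⟩
    · show m :: S.1.dropWhile _ = cstackL arr (m+1)
      rw [hst]
      exact (chainL_eq arr m).symm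
    · show (S.2.set m _).length = arr.length
      rw [List.length_set, ih2]
    · intro k hk
      show (S.2.set m _).getD k 0 = _
      rw [hp]
      have hklen : k < (S.2.set m (scanL arr (arr.getD m 0) m)).length := by
        rw [List.length_set, ih2]; exact hk
      rw [List.getD_eq_getElem _ _ hklen, List.getElem_set]
      by_cases hkm : m = k
      · rw [if_pos hkm, if_pos (by omega), hkm]
      · rw [if_neg hkm, ← List.getD_eq_getElem _ 0 (by rw [ih2]; exact hk), ih3 k hk]
        by_cases hkm2 : k < m
        · rw [if_pos hkm2, if_pos (by omega)]
        · rw [if_neg hkm2, if_neg (by omega)]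

lemma loop2_inv (arr : List Int) :
    ∀ m, m ≤ arr.length →
      (((List.range' m (arr.length - m)).reverse).foldl (stepA2 arr)
          ([], List.replicate arr.length (arr.length : Int))).1
        = cstackR arr m ∧
      (((List.range' m (arr.length - m)).reverse).foldl (stepA2 arr)
          ([], List.replicate arr.length (arr.length : Int))).2.length
        = arr.length ∧
      ∀ k, k < arr.length →
        (((List.range' m (arr.length - m)).reverse).foldl (stepA2 arr)
            ([], List.replicate arr.length (arr.length : Int))).2.getD k 0
          = if m ≤ k then scanR arr (arr.getD k 0) (k+1) else (arr.length : Int) := by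
  have aux : ∀ d m, m ≤ arr.length → arr.length ≤ m + d →
      (((List.range' m (arr.length - m)).reverse).foldl (stepA2 arr)
          ([], List.replicate arr.length (arr.length : Int))).1
        = cstackR arr m ∧
      (((List.range' m (arr.length - m)).reverse).foldl (stepA2 arr)
          ([], List.replicate arr.length (arr.length : Int))).2.length
        = arr.length ∧
      ∀ k, k < arr.length →
        (((List.range' m (arr.length - m)).reverse).foldl (stepA2 arr)
            ([], List.replicate arr.length (arr.length : Int))).2.getD k 0
          = if m ≤ k then scanR arr (arr.getD k 0) (k+1) else (arr.length : Int) := by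
    intro d
    induction d with
    | zero =>
      intro m h1 h2
      have hmn : m = arr.length := by omega
      subst hmn
      rw [Nat.sub_self]
      simp only [List.range'_zero, List.reverse_nil, List.foldl_nil]
      refine ⟨?_, by simp, fun k hk => ?_⟩
      · rw [cstackR, if_neg (by omega)]
      · rw [if_neg (by omega), List.getD_eq_getElem _ _ (by simpa using hk)]
        simp
    | succ d ih =>
      intro m h1 h2
      rcases Nat.lt_or_ge m arr.length with hlt | hge
      · obtain ⟨ih1, ih2, ih3⟩ := ih (m+1) (by omega) (by omega)
        have hrange : (List.range' m (arr.length - m)).reverse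
            = (List.range' (m+1) (arr.length - (m+1))).reverse ++ [m] := by
          have hc : arr.length - m = (arr.length - (m+1)) + 1 := by omega
          rw [hc, List.range'_succ, List.reverse_cons]
        rw [hrange, List.foldl_append]
        simp only [List.foldl_cons, List.foldl_nil]
        set S := (List.range' (m+1) (arr.length - (m+1))).reverse.foldl (stepA2 arr)
          ([], List.replicate arr.length (arr.length : Int)) with hS
        have hst : S.1.dropWhile (fun j => arr.getD j 0 < arr.getD m 0)
            = chainROpt arr (scanR arr (arr.getD m 0) (m+1)) := by
          rw [ih1]; exact drop_cstackR arr (arr.getD m 0) (m+1) (by omega)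
        have hp : (match S.1.dropWhile (fun j => arr.getD j 0 < arr.getD m 0) with
            | [] => (arr.length : Int) | j :: _ => (j : Int)) = scanR arr (arr.getD m 0) (m+1) := by
          rw [hst]
          rcases scanR_spec arr (arr.getD m 0) (m+1) with ⟨h1', _⟩ | ⟨j, _, hj2, hj3, _, _⟩
          · rw [h1']
            rw [show chainROpt arr ((arr.length : Nat) : Int) = [] from by
              rw [chainROpt, if_neg (by rw [Int.toNat_natCast]; omega)]]
          · rw [hj3]
            rw [show chainROpt arr ((j : Nat) : Int) = chainR arr j from by
              rw [chainROpt, if_pos (by rw [Int.toNat_natCast]; omega), Int.toNat_natCast],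
              chainR_eq]
        refine ⟨?_, ?_, ?_⟩
        · show m :: S.1.dropWhile _ = cstackR arr m
          rw [hst, cstackR, if_pos hlt]
          exact (chainR_eq arr m).symm
        · show (S.2.set m _).length = arr.length
          rw [List.length_set, ih2]
        · intro k hk
          show (S.2.set m _).getD k 0 = _
          rw [hp]
          have hklen : k < (S.2.set m (scanR arr (arr.getD m 0) (m+1))).length := by
            rw [List.length_set, ih2]; exact hk
          rw [List.getD_eq_getElem _ _ hklen, List.getElem_set]
          by_cases hkm : m = k
          · rw [if_pos hkm, if_pos (by omega), hkm]
          · rw [if_neg hkm, ← List.getD_eq_getElem _ 0 (by rw [ih2]; exact hk), ih3 k hk]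
            by_cases hkm2 : m+1 ≤ k
            · rw [if_pos hkm2, if_pos (by omega)]
            · rw [if_neg hkm2, if_neg (by omega)]
      · have hmn : m = arr.length := by omega
        subst hmn
        rw [Nat.sub_self]
        simp only [List.range'_zero, List.reverse_nil, List.foldl_nil]
        refine ⟨?_, by simp, fun k hk => ?_⟩
        · rw [cstackR, if_neg (by omega)]
        · rw [if_neg (by omega), List.getD_eq_getElem _ _ (by simpa using hk)]
          simp
  exact fun m hm => aux arr.length m hm (by omega)

-- ===== VERDICT (by name: the statement is the Claim_ definition above) =====
theorem maxPeople_spec : Claim_equal_maxPeople := by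
  intro arr _
  unfold Spec_maxPeople
  by_cases h0 : arr.length = 0
  · simp [maxPeople, maxPeople_alt, h0]
  · obtain ⟨_, _, hL⟩ := loop1_inv arr arr.length (le_refl _)
    obtain ⟨_, _, hR⟩ := loop2_inv arr 0 (by omega)
    have hrw : List.range' 0 (arr.length - 0) = List.range arr.length := by
      rw [Nat.sub_zero, ← List.range_eq_range']
    rw [hrw] at hR
    simp only [maxPeople, maxPeople_alt, if_neg h0]
    apply PySem.List.foldl_congr_mem
    intro best i hi
    have hin : i < arr.length := List.mem_range.mp hi
    have h1 := hL i hin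
    rw [if_pos hin] at h1
    have h2 := hR i hin
    rw [if_pos (by omega)] at h2
    rw [h1, h2]
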